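-- pv_equiv track=rewrite | github.com/UshliyOrk/ege | вариант1/5.py | f
-- ===== SOURCE A (Python) =====
-- def f(n):
-- 	res = str(bin(n)[2:])
-- 	n1 = res
-- 	while len(res) < 8:
-- 		res = "0"+res
--
-- 	r=[]
-- 	for i in res:
-- 		if i == "0":
-- 			r.append("1")
-- 		else:
-- 			r.append("0")
-- 	n2 = "".join(r)
-- 	res = int(n2, 2) - int(n1, 2)
-- 	return res
-- ===== SOURCE B (Python) =====
-- def f(n):
--     # Invert n's binary form padded to at least 8 bits and subtract n:
--     # the inverted value is (2^width - 1) - n, so the answer is a closed form.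
--     return ((1 << max(n.bit_length(), 8)) - 1) - 2 * n
-- ===== Notes on version B (the rewrite author's own statement) =====
-- stated objective: simpler
-- what changed: Replaces the binary-string build/pad/invert/reparse pipeline with the closed form ((1 << max(n.bit_length(), 8)) - 1) - 2*n, no strings or loops at all.
-- outside the precondition, e.g. on f(-5): A raises ValueError, B returns 265
import Mathlib
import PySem

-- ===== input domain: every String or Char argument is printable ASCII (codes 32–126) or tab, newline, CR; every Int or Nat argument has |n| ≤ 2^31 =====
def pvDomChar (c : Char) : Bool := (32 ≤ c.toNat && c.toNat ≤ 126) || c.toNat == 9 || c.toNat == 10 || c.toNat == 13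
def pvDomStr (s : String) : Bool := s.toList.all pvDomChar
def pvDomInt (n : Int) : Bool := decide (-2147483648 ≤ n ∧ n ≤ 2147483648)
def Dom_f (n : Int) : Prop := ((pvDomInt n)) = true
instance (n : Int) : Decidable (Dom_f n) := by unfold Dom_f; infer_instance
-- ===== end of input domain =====

-- B replaces A's binary-string build/pad/invert/reparse pipeline (return-value only)
-- with the closed form ((2^max(bitlen n, 8)) - 1) - 2*n; objective: simpler.

-- ===== PORT A =====
-- bin(n)[2:] for n ≥ 0 (digits of n>0; helper produces [] for 0, bin(0)[2:] = "0")
def binCore (n : Nat) : List Char :=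
  if h : n = 0 then []
  else binCore (n / 2) ++ [if n % 2 = 1 then '1' else '0']
decreasing_by exact Nat.div_lt_self (Nat.pos_of_ne_zero h) (by omega)

def binStr (n : Nat) : List Char := if n = 0 then ['0'] else binCore n

-- while len(res) < 8: res = "0" + res
def padLoop (l : List Char) : List Char :=
  if l.length < 8 then padLoop ('0' :: l) else l
termination_by 8 - l.length

-- int(s, 2) on a string of binary digits
def parseBin (l : List Char) : Nat :=
  l.foldl (fun acc c => 2 * acc + (if c = '1' then 1 else 0)) 0

def f (n : Int) : Int :=
  let res := binStr n.toNat
  let n1 := res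
  let res := padLoop res
  -- for i in res: r.append("1" if i == "0" else "0"); n2 = "".join(r)
  let n2 := res.foldl (fun r i => r ++ [if i = '0' then '1' else '0']) []
  (parseBin n2 : Int) - (parseBin n1 : Int)

-- ===== PORT B =====
-- n.bit_length() (of |n|, as Python's)
def bitLen (n : Nat) : Nat :=
  if h : n = 0 then 0 else bitLen (n / 2) + 1
decreasing_by exact Nat.div_lt_self (Nat.pos_of_ne_zero h) (by omega)

def f_alt (n : Int) : Int :=
  ((2 : Int) ^ (max (bitLen n.natAbs) 8) - 1) - 2 * n

-- ===== PRECONDITION & SPEC =====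
-- Pre_f excludes n < 0, where A raises ValueError (int('b…', 2) on bin(n)[2:]).
def Pre_f (n : Int) : Prop := 0 ≤ n
instance (n : Int) : Decidable (Pre_f n) := by unfold Pre_f; infer_instance
def pvWitness_f : Int := 5

def Spec_f (n : Int) (out : Int) : Prop := out = f_alt n
instance (n : Int) (out : Int) : Decidable (Spec_f n out) := by unfold Spec_f; infer_instance

-- ===== CLAIM (what is proved, stated in full; the proofs are below) =====
def Claim_equal_f : Prop := ∀ (n : Int), Dom_f n → Pre_f n → Spec_f n (f n)

-- ===== LEMMAS AND PROOFS =====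

def Bits (l : List Char) : Prop := ∀ c ∈ l, c = '0' ∨ c = '1'

theorem parseBin_append (xs : List Char) (c : Char) :
    parseBin (xs ++ [c]) = 2 * parseBin xs + (if c = '1' then 1 else 0) := by
  simp [parseBin, List.foldl_append]

theorem parseBin_cons_zero (l : List Char) : parseBin ('0' :: l) = parseBin l := by
  simp [parseBin, List.foldl]

theorem parseBin_binCore (n : Nat) : parseBin (binCore n) = n := by
  induction n using Nat.strong_induction_on with
  | _ n ih =>
    rw [binCore]
    split
    · simp [parseBin]; omega
    · rename_i h
      rw [parseBin_append, ih (n / 2) (Nat.div_lt_self (Nat.pos_of_ne_zero h) (by omega))]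
      rcases Nat.mod_two_eq_zero_or_one n with h2 | h2 <;> simp [h2] <;> omega

theorem parseBin_binStr (n : Nat) : parseBin (binStr n) = n := by
  unfold binStr
  split
  · simp [parseBin]; omega
  · exact parseBin_binCore n

theorem bits_binCore (n : Nat) : Bits (binCore n) := by
  induction n using Nat.strong_induction_on with
  | _ n ih =>
    rw [binCore]
    split
    · intro c hc; simp at hc
    · rename_i h
      intro c hc
      rcases List.mem_append.mp hc with h1 | h1
      · exact ih (n / 2) (Nat.div_lt_self (Nat.pos_of_ne_zero h) (by omega)) c h1
      · simp at h1; subst h1; split_ifs <;> simp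

theorem bits_binStr (n : Nat) : Bits (binStr n) := by
  unfold binStr
  split
  · intro c hc; simp at hc; simp [hc]
  · exact bits_binCore n

theorem length_binCore (n : Nat) : (binCore n).length = bitLen n := by
  induction n using Nat.strong_induction_on with
  | _ n ih =>
    rw [binCore, bitLen]
    split
    · simp
    · rename_i h
      simp [ih (n / 2) (Nat.div_lt_self (Nat.pos_of_ne_zero h) (by omega))]

theorem length_binStr (n : Nat) : (binStr n).length = max (bitLen n) 1 := by
  unfold binStr
  split
  · rename_i h; subst h; rw [bitLen]; simp
  · rename_i h
    rw [length_binCore]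
    have : bitLen n ≠ 0 := by rw [bitLen]; simp [h]
    omega

theorem padLoop_parse (l : List Char) : parseBin (padLoop l) = parseBin l := by
  fun_induction padLoop l with
  | case1 l h ih => rw [ih, parseBin_cons_zero]
  | case2 l h => rfl

theorem padLoop_length (l : List Char) : (padLoop l).length = max l.length 8 := by
  fun_induction padLoop l with
  | case1 l h ih => simp at ih ⊢; omega
  | case2 l h => omega

theorem padLoop_bits (l : List Char) (hb : Bits l) : Bits (padLoop l) := by
  fun_induction padLoop l with
  | case1 l h ih =>
    apply ih
    intro c hc
    rcases List.mem_cons.mp hc with h0 | h0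
    · subst h0; left; rfl
    · exact hb c h0
  | case2 l h => exact hb

-- the for-loop with append is map
theorem inv_foldl_eq_map (l : List Char) :
    l.foldl (fun r i => r ++ [if i = '0' then '1' else '0']) [] =
      l.map (fun i => if i = '0' then '1' else '0') := by
  suffices h : ∀ acc : List Char,
      l.foldl (fun r i => r ++ [if i = '0' then '1' else '0']) acc =
        acc ++ l.map (fun i => if i = '0' then '1' else '0') by
    simpa using h []
  induction l with
  | nil => simp
  | cons c cs ih => intro acc; simp [List.foldl, ih]

theorem parse_inv_add (l : List Char) (hb : Bits l) :
    parseBin (l.map (fun i => if i = '0' then '1' else '0')) + parseBin l =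
      2 ^ l.length - 1 := by
  induction l using List.reverseRecOn with
  | nil => simp [parseBin]
  | append_singleton xs c ih =>
    have hxs : Bits xs := fun d hd => hb d (List.mem_append.mpr (Or.inl hd))
    have hc : c = '0' ∨ c = '1' := hb c (by simp)
    have h1 : 1 ≤ 2 ^ xs.length := Nat.one_le_two_pow
    specialize ih hxs
    rcases hc with h | h <;> subst h <;>
      simp only [List.map_append, List.map_cons, List.map_nil, parseBin_append,
        List.length_append, List.length_cons, List.length_nil,
        pow_succ, Char.reduceEq, reduceIte] <;>
      omega

theorem f_eq_closed (m : Nat) :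
    f (m : Int) = ((2 : Int) ^ (max (bitLen m) 8) - 1) - 2 * m := by
  have htn : ((m : Int)).toNat = m := Int.toNat_natCast m
  have hL : (padLoop (binStr m)).length = max (bitLen m) 8 := by
    rw [padLoop_length, length_binStr]; omega
  have hparse : parseBin (padLoop (binStr m)) = m := by
    rw [padLoop_parse, parseBin_binStr]
  have hbits : Bits (padLoop (binStr m)) := padLoop_bits _ (bits_binStr m)
  have hsum := parse_inv_add (padLoop (binStr m)) hbits
  rw [hparse, hL] at hsum
  have hlt : (1:Nat) ≤ 2 ^ max (bitLen m) 8 := Nat.one_le_two_pow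
  show (let res := binStr ((m : Int)).toNat
    let n1 := res
    let res := padLoop res
    let n2 := res.foldl (fun r i => r ++ [if i = '0' then '1' else '0']) []
    (parseBin n2 : Int) - (parseBin n1 : Int)) = _
  simp only [htn, inv_foldl_eq_map, parseBin_binStr]
  zify [hlt] at hsum
  linarith [hsum]

-- ===== VERDICT (by name: the statement is the Claim_ definition above) =====
theorem f_spec : Claim_equal_f := by
  intro n _ hpre
  unfold Spec_f f_alt
  have hn : ((n.toNat : Int)) = n := Int.toNat_of_nonneg hpre
  have := f_eq_closed n.toNat
  rw [hn] at this
  rw [this]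
  have : n.natAbs = n.toNat := by omega
  rw [this]
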